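-- pv_equiv track=rewrite | github.com/Jtgunnels/heartlink-app-clean | HeartLink_ResearchAnalyst_BaselinePack_USFDA/04_Algorithm_Validation/04_Algorithm_Validation/02_Validation/HeartLink_v4_1_full_trial_runner.py | apply_orange_green_smoothing
-- ===== SOURCE A (Python) =====
-- from typing import List, Dict, Tuple
--
-- def apply_orange_green_smoothing(lastCats: List[str], proposed: str, stableDays: int=5) -> str:
--     if proposed != "Green" or not lastCats:
--         return proposed
--     lastEsc = -1
--     for i in range(len(lastCats)-1, -1, -1):
--         if lastCats[i] in ("Orange","Red"):
--             lastEsc = i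
--             break
--     if lastEsc == -1:
--         return proposed
--     window = lastCats[max(lastEsc+1, len(lastCats)-stableDays):]
--     ok = (len(window) >= stableDays) and all(c not in ("Orange","Red") for c in window)
--     return proposed if ok else "Yellow"
-- ===== SOURCE B (Python) =====
-- from typing import List
--
-- def apply_orange_green_smoothing(lastCats: List[str], proposed: str, stableDays: int=5) -> str:
--     if proposed != "Green" or not lastCats:
--         return proposed
--     recent = lastCats[max(0, len(lastCats)-stableDays):]
--     return "Yellow" if any(c in ("Orange","Red") for c in recent) else "Green"
-- ===== Notes on version B (the rewrite author's own statement) =====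
-- stated objective: simpler
-- what changed: Replaces the backward scan for the last escalation index plus the window-length-and-all() check with one direct membership test over the trailing window of up to stableDays entries.
import Mathlib
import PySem

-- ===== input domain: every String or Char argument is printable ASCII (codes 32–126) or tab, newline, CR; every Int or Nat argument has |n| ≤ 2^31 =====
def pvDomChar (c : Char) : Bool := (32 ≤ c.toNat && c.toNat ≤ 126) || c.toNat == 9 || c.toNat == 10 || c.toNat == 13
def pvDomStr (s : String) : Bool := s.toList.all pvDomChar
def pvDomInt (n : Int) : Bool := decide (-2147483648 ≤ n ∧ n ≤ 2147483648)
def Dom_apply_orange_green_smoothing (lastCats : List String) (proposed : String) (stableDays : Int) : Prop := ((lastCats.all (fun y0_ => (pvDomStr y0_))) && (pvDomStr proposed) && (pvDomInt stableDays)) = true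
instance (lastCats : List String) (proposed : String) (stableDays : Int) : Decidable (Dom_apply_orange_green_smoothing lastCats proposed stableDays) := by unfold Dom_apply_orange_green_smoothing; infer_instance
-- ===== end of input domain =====

-- B replaces A's find-last-escalation-index scan + window-length/all() check with a single
-- membership test over the trailing window of up to stableDays entries (objective: simpler).

-- `c in ("Orange","Red")` (shared by both ports)
def escCat (c : String) : Bool := c == "Orange" || c == "Red"

-- ===== PORT A =====
-- A's backward loop `for i in range(len(lastCats)-1, -1, -1)` with break: structural recursion
-- on the counter i+1; every index read is in range, so `getD i ""` is exact there.
def aFindLastEsc (lastCats : List String) : Nat → Int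
  | 0 => -1
  | i + 1 => if escCat (lastCats.getD i "") then (i : Int) else aFindLastEsc lastCats i

def apply_orange_green_smoothing (lastCats : List String) (proposed : String) (stableDays : Int) : String :=
  if proposed ≠ "Green" ∨ lastCats = [] then proposed
  else
    let lastEsc := aFindLastEsc lastCats lastCats.length
    if lastEsc = -1 then proposed
    else
      let window := PySem.List.slice lastCats (some (max (lastEsc + 1) ((lastCats.length : Int) - stableDays))) none
      let ok := decide ((window.length : Int) ≥ stableDays) && window.all (fun c => !escCat c)
      if ok then proposed else "Yellow"

-- ===== PORT B =====
def apply_orange_green_smoothing_alt (lastCats : List String) (proposed : String) (stableDays : Int) : String :=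
  if proposed ≠ "Green" ∨ lastCats = [] then proposed
  else
    let recent := PySem.List.slice lastCats (some (max 0 ((lastCats.length : Int) - stableDays))) none
    if recent.any escCat then "Yellow" else "Green"

-- ===== PRECONDITION & SPEC =====
def Spec_apply_orange_green_smoothing (lastCats : List String) (proposed : String) (stableDays : Int) (out : String) : Prop := out = apply_orange_green_smoothing_alt lastCats proposed stableDays
instance (lastCats : List String) (proposed : String) (stableDays : Int) (out : String) : Decidable (Spec_apply_orange_green_smoothing lastCats proposed stableDays out) := by unfold Spec_apply_orange_green_smoothing; infer_instance

-- ===== CLAIM (what is proved, stated in full; the proofs are below) =====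
def Claim_equal_apply_orange_green_smoothing : Prop := ∀ (lastCats : List String) (proposed : String) (stableDays : Int), Dom_apply_orange_green_smoothing lastCats proposed stableDays → Spec_apply_orange_green_smoothing lastCats proposed stableDays (apply_orange_green_smoothing lastCats proposed stableDays)

-- ===== LEMMAS AND PROOFS =====

-- Characterisation of A's backward scan over the first k entries.
lemma aFindLastEsc_spec (xs : List String) (k : Nat) :
    (aFindLastEsc xs k = -1 ∧ ∀ i : Nat, i < k → escCat (xs.getD i "") = false) ∨
    (∃ j : Nat, j < k ∧ aFindLastEsc xs k = (j : Int) ∧ escCat (xs.getD j "") = true ∧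
      ∀ i : Nat, j < i → i < k → escCat (xs.getD i "") = false) := by
  induction k with
  | zero => left; exact ⟨rfl, by omega⟩
  | succ k ih =>
    by_cases h : escCat (xs.getD k "") = true
    · right
      refine ⟨k, by omega, ?_, h, by intro i h1 h2; omega⟩
      simp only [aFindLastEsc]
      rw [if_pos h]
    · have hrec : aFindLastEsc xs (k + 1) = aFindLastEsc xs k := by
        simp only [aFindLastEsc]
        rw [if_neg h]
      have h' : escCat (xs.getD k "") = false := Bool.eq_false_iff.mpr h
      rcases ih with ⟨h1, h2⟩ | ⟨j, hj, e, he, hrest⟩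
      · left
        refine ⟨hrec.trans h1, ?_⟩
        intro i hi
        rcases Nat.lt_succ_iff_lt_or_eq.mp hi with hlt | rfl
        · exact h2 i hlt
        · exact h'
      · right
        refine ⟨j, by omega, hrec.trans e, he, ?_⟩
        intro i hji hi
        rcases Nat.lt_succ_iff_lt_or_eq.mp hi with hlt | rfl
        · exact hrest i hji hlt
        · exact h'

lemma any_drop_true (xs : List String) (d j : Nat) (hd : d ≤ j) (hj : j < xs.length)
    (h : escCat (xs[j]'hj) = true) : (xs.drop d).any escCat = true := by
  refine List.any_eq_true.mpr ⟨xs[j]'hj, ?_, h⟩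
  have : (xs.drop d)[j - d]'(by simp; omega) = xs[j]'hj := by
    rw [List.getElem_drop]
    congr 1
    omega
  exact this ▸ List.getElem_mem _

lemma any_drop_false (xs : List String) (d : Nat)
    (h : ∀ i : Nat, d ≤ i → i < xs.length → escCat (xs.getD i "") = false) :
    (xs.drop d).any escCat = false := by
  refine List.any_eq_false.mpr ?_
  intro x hx
  rcases List.getElem_of_mem hx with ⟨i, hi, rfl⟩
  rw [List.getElem_drop]
  simp only [List.length_drop] at hi
  have := h (d + i) (by omega) (by omega)
  rw [List.getD_eq_getElem xs "" (by omega)] at this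
  exact Bool.eq_false_iff.mp this

-- ===== VERDICT (by name: the statement is the Claim_ definition above) =====
theorem apply_orange_green_smoothing_spec : Claim_equal_apply_orange_green_smoothing := by
  intro lastCats proposed stableDays _
  unfold Spec_apply_orange_green_smoothing apply_orange_green_smoothing apply_orange_green_smoothing_alt
  by_cases hg : proposed ≠ "Green" ∨ lastCats = []
  · simp [hg]
  · simp only [if_neg hg]
    push Not at hg
    obtain ⟨hp, hne⟩ := hg
    have hlen : 0 < lastCats.length := List.length_pos_iff.mpr hne
    rcases aFindLastEsc_spec lastCats lastCats.length with ⟨h1, h2⟩ | ⟨j, hj, e, he, hrest⟩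
    · -- no escalation anywhere: A returns proposed = "Green"; B's window has no escalation
      rw [h1]
      have hB : (PySem.List.slice lastCats (some (max 0 ((lastCats.length : Int) - stableDays))) none).any escCat = false := by
        rw [PySem.List.slice_from _ (by positivity)]
        exact any_drop_false _ _ (fun i _ hi => h2 i hi)
      simp [hB, hp]
    · -- last escalation at index j
      rw [e]
      have hjne : (j : Int) ≠ -1 := by omega
      rw [if_neg hjne]
      have heg : escCat (lastCats[j]'hj) = true := by
        rwa [List.getD_eq_getElem lastCats "" hj] at he
      by_cases hc : (j : Int) + 1 ≤ (lastCats.length : Int) - stableDays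
      · -- escalation strictly before the trailing window: both return "Green"
        have hmaxA : max ((j : Int) + 1) ((lastCats.length : Int) - stableDays) = (lastCats.length : Int) - stableDays := by omega
        have hmaxB : max 0 ((lastCats.length : Int) - stableDays) = (lastCats.length : Int) - stableDays := by omega
        have hpos : (0 : Int) ≤ (lastCats.length : Int) - stableDays := by omega
        rw [hmaxA, hmaxB, PySem.List.slice_from _ hpos]
        set d : Nat := ((lastCats.length : Int) - stableDays).toNat with hd
        have hnoesc : (lastCats.drop d).any escCat = false := by
          refine any_drop_false _ _ (fun i hdi hi => ?_)
          exact hrest i (by omega) hi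
        have hall : (lastCats.drop d).all (fun c => !escCat c) = true := by
          rw [List.all_eq_not_any_not]
          simp only [Bool.not_not]
          simp [hnoesc]
        simp [hall, hp, hnoesc, List.length_drop]
        omega
      · -- escalation inside the trailing window: both return "Yellow"
        have hmaxA : max ((j : Int) + 1) ((lastCats.length : Int) - stableDays) = (j : Int) + 1 := by omega
        rw [hmaxA, PySem.List.slice_from _ (by positivity),
            PySem.List.slice_from _ (by positivity)]
        have hdA : ((j : Int) + 1).toNat = j + 1 := by omega
        rw [hdA]
        have hshort : ¬ stableDays ≤ ((lastCats.length - (j + 1) : Nat) : Int) := by omega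
        have hesc : (lastCats.drop (max 0 ((lastCats.length : Int) - stableDays)).toNat).any escCat = true := by
          exact any_drop_true _ _ j (by omega) hj heg
        simp [hshort, hesc, List.length_drop]
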